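-- pv_equiv track=rewrite | github.com/snowwhitewolf/Algorithm | SWEA/D3/1216. 회문2.py | sero
-- ===== SOURCE A (Python) =====
-- def sero(lst, k):
--     for y in range(101-k):
--         for x in range(100):
--             A = ''
--             for z in range(k):
--                 A += lst[y+z][x]
--             if A == A[::-1]:
--                 return 1
-- ===== SOURCE B (Python) =====
-- def sero(lst, k):
--     # Scan column-major; test each vertical window by comparing mirror
--     # cells directly (k//2 comparisons, early exit), never building a string.
--     h = k // 2
--     for x in range(100):
--         for y in range(101 - k):
--             if all(lst[y + j][x] == lst[y + k - 1 - j][x] for j in range(h)):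
--                 return 1
--     return None
-- ===== Notes on version B (the rewrite author's own statement) =====
-- stated objective: alternative
-- what changed: B scans the grid column-major and tests each vertical window in place by comparing the k//2 mirror cell pairs with early exit, instead of A's row-major scan that materialises each k-character column string and compares it with its full reversal.
-- outside the precondition, e.g. on sero(['aa'], 1): A returns 1, B returns 1
import Mathlib
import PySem

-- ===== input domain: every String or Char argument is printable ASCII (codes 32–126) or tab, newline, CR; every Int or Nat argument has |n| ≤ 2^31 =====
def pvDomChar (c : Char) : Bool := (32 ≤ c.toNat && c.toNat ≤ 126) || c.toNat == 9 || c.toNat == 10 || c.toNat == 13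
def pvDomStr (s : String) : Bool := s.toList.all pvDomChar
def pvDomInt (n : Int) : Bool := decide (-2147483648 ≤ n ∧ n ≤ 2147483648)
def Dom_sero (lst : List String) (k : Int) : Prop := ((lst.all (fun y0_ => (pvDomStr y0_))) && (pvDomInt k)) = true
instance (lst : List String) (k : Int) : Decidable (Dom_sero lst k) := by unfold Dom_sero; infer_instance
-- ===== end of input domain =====

-- B scans column-major and compares the k//2 mirror cell pairs of each vertical
-- window in place (early exit, no string built), instead of A's row-major scan
-- building each column string and comparing it with its full reversal (objective: alternative).

-- ===== PORT A =====
-- lst[i][x]  (shared atom of both ports: a single grid access; none = IndexError)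
def seroCell (lst : List String) (i x : Int) : Option Char :=
  (PySem.List.pyGet? lst i).bind (fun row => PySem.Str.pyGet? row x)

-- A = ''; for z in range(k): A += lst[y+z][x]   (Python str as List Char; none once an access raises)
def seroBuild (lst : List String) (y x : Int) (zs : List Int) : Option (List Char) :=
  zs.foldl (fun acc z => acc.bind (fun A => (seroCell lst (y + z) x).map (fun ch => A ++ [ch]))) (some [])

-- a 'for v in range(a, a+fuel)' loop whose body may 'return' (some = returned, none = fell
-- through): recursion with early exit, so evaluation stops at the first hit exactly as
-- Python's return does (the range is never materialised)
def seroFor (body : Int → Option Int) (a : Int) : Nat → Option Int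
  | 0 => none
  | n + 1 =>
    match body a with
    | some v => some v
    | none => seroFor body (a + 1) n

-- A's return-1-early loops (some 1 = returned, none = fell through);
-- A == A[::-1] is A = A.reverse (PySem.List.slice?_none_none_neg_one); a raising access yields none
-- for that window — arbitrary, those inputs are outside Pre_sero.
def sero (lst : List String) (k : Int) : Option Int :=
  seroFor (fun y =>
    (PySem.List.pyRange 0 100 1).foldl (fun r2 x =>
      if r2.isSome then r2 else
        match seroBuild lst y x (PySem.List.pyRange 0 k 1) with
        | some A => if A = A.reverse then some 1 else none
        | none => none) none) 0 (101 - k).toNat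

-- ===== PORT B =====
-- h = k // 2; column-major scan; all(lst[y+j][x] == lst[y+k-1-j][x] for j in range(h))
def sero_alt (lst : List String) (k : Int) : Option Int :=
  (PySem.List.pyRange 0 100 1).foldl (fun r x =>
    if r.isSome then r else
      seroFor (fun y =>
        if (PySem.List.pyRange 0 (PySem.Int.floordiv k 2) 1).all
             (fun j => seroCell lst (y + j) x == seroCell lst (y + k - 1 - j) x)
        then some 1 else none) 0 (101 - k).toNat) none

-- ===== PRECONDITION & SPEC =====
-- Pre_sero excludes under-sized grids (fewer than 100 rows of length ≥ 100) when 1 ≤ k ≤ 100: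
-- there A normally raises IndexError, though it may still return 1 early if a palindromic
-- window precedes the first missing cell (a narrowing; see the cite in the claim).
def Pre_sero (lst : List String) (k : Int) : Prop :=
  k ≤ 0 ∨ 100 < k ∨ (100 ≤ lst.length ∧ ∀ s ∈ lst.take 100, 100 ≤ PySem.Str.len s)
instance (lst : List String) (k : Int) : Decidable (Pre_sero lst k) := by unfold Pre_sero; infer_instance
def pvWitness_sero : List String × Int := ([], 101)

def Spec_sero (lst : List String) (k : Int) (out : Option Int) : Prop := out = sero_alt lst k
instance (lst : List String) (k : Int) (out : Option Int) : Decidable (Spec_sero lst k out) := by unfold Spec_sero; infer_instance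

-- ===== CLAIM (what is proved, stated in full; the proofs are below) =====
def Claim_equal_sero : Prop := ∀ (lst : List String) (k : Int), Dom_sero lst k → Pre_sero lst k → Spec_sero lst k (sero lst k)

-- ===== LEMMAS AND PROOFS =====

-- the character at a valid grid cell (proof-side name for the some-case of seroCell)
def seroChar (lst : List String) (i x : Int) : Char := (seroCell lst i x).getD ' '

-- an early-return loop: once some, stays; the first hit's payload is always `some 1`
theorem sero_foldHit (p : Int → Option Int) (hp : ∀ a, (p a).isSome → p a = some 1) :
    ∀ (l : List Int) (r : Option Int),
      l.foldl (fun r a => if r.isSome then r else p a) r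
        = if r.isSome then r else if l.any (fun a => (p a).isSome) then some 1 else none := by
  intro l
  induction l with
  | nil => intro r; cases r <;> simp
  | cons a l ih =>
    intro r
    cases r with
    | some v => rw [List.foldl_cons]; simp only [Option.isSome_some, if_true]; rw [ih]; simp
    | none =>
      rw [List.foldl_cons]
      simp only [Option.isSome_none, Bool.false_eq_true, if_false]
      rw [ih]
      by_cases h : (p a).isSome
      · rw [hp a h]; simp [List.any_cons, h]
      · simp only [Bool.not_eq_true] at h
        simp [List.any_cons, h]

-- half-length characterisation of "a list equals its reversal"
theorem sero_palindrome_half (L : List Char) :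
    (L = L.reverse) ↔ ∀ j : Nat, j < L.length / 2 → L[j]? = L[L.length - 1 - j]? := by
  constructor
  · intro h j hj
    conv_lhs => rw [h]
    rw [List.getElem?_reverse (by omega)]
  · intro h
    apply List.ext_getElem?
    intro i
    rcases lt_or_ge i L.length with hi | hi
    · rw [List.getElem?_reverse hi]
      by_cases hlo : i < L.length / 2
      · exact h i hlo
      · by_cases hmid : i = L.length - 1 - i
        · rw [← hmid]
        · have := h (L.length - 1 - i) (by omega)
          rw [show L.length - 1 - (L.length - 1 - i) = i by omega] at this
          exact this.symm
    · rw [List.getElem?_eq_none (by omega), List.getElem?_eq_none (by simp; omega)]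

theorem sero_cell_some (lst : List String) (i x : Int)
    (hg : 100 ≤ lst.length ∧ ∀ s ∈ lst.take 100, 100 ≤ PySem.Str.len s)
    (hi : 0 ≤ i) (hi2 : i < 100) (hx : 0 ≤ x) (hx2 : x < 100) :
    seroCell lst i x = some (seroChar lst i x) := by
  obtain ⟨hlen, hrows⟩ := hg
  have hin : i.toNat < lst.length := by omega
  have hrow : PySem.List.pyGet? lst i = some lst[i.toNat] := by
    rw [PySem.List.pyGet?_of_nonneg lst hi, List.getElem?_eq_getElem hin]
  have hmem : lst[i.toNat] ∈ lst.take 100 := by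
    have h100 : i.toNat < (lst.take 100).length := by simp; omega
    have : (lst.take 100)[i.toNat] = lst[i.toNat] := List.getElem_take
    rw [← this]
    exact List.getElem_mem h100
  have hrl : 100 ≤ PySem.Str.len lst[i.toNat] := hrows _ hmem
  rw [PySem.Str.len_eq] at hrl
  have hchar : PySem.List.pyGet? lst[i.toNat].toList x = some (lst[i.toNat].toList[x.toNat]'(by omega)) := by
    rw [PySem.List.pyGet?_of_nonneg _ hx, List.getElem?_eq_getElem (by omega)]
  simp [seroCell, seroChar, hrow, hchar]

theorem sero_build_some (lst : List String) (y x : Int)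
    (zs : List Int) (h : ∀ z ∈ zs, ∃ c, seroCell lst (y + z) x = some c) :
    ∀ A0 : List Char,
      zs.foldl (fun acc z => acc.bind (fun A => (seroCell lst (y + z) x).map (fun ch => A ++ [ch]))) (some A0)
        = some (A0 ++ zs.map (fun z => seroChar lst (y + z) x)) := by
  induction zs with
  | nil => intro A0; simp
  | cons z zs ih =>
    intro A0
    obtain ⟨c, hc⟩ := h z (List.mem_cons_self ..)
    rw [List.foldl_cons]
    simp only [Option.bind_some, hc, Option.map_some]
    rw [ih (fun z hz => h z (List.mem_cons_of_mem _ hz)) (A0 ++ [c])]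
    have : seroChar lst (y + z) x = c := by simp [seroChar, hc]
    simp [this]

-- pointwise: A's window test agrees with B's mirror test on a valid window
theorem sero_hit_iff (lst : List String) (k y x : Int)
    (hk : 1 ≤ k) (hk2 : k ≤ 100)
    (hg : 100 ≤ lst.length ∧ ∀ s ∈ lst.take 100, 100 ≤ PySem.Str.len s)
    (hy : 0 ≤ y) (hy2 : y < 101 - k) (hx : 0 ≤ x) (hx2 : x < 100) :
    ((match seroBuild lst y x (PySem.List.pyRange 0 k 1) with
      | some A => if A = A.reverse then some 1 else (none : Option Int)
      | none => none).isSome = true)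
      ↔ ((PySem.List.pyRange 0 (PySem.Int.floordiv k 2) 1).all
           (fun j => seroCell lst (y + j) x == seroCell lst (y + k - 1 - j) x) = true) := by
  have hcell : ∀ z : Int, 0 ≤ z → z < k → seroCell lst (y + z) x = some (seroChar lst (y + z) x) :=
    fun z h0 h1 => sero_cell_some lst (y + z) x hg (by omega) (by omega) hx hx2
  have hbuild : seroBuild lst y x (PySem.List.pyRange 0 k 1)
      = some ((PySem.List.pyRange 0 k 1).map (fun z => seroChar lst (y + z) x)) := by
    unfold seroBuild
    rw [sero_build_some lst y x _ (fun z hz => ?_)]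
    · simp
    · rw [PySem.List.mem_pyRange_one] at hz
      exact ⟨_, hcell z hz.1 hz.2⟩
  rw [hbuild]
  set L := (PySem.List.pyRange 0 k 1).map (fun z => seroChar lst (y + z) x) with hL
  have hlen : L.length = k.toNat := by
    simp [hL, PySem.List.pyRange_one]
  have hget : ∀ j : Nat, j < k.toNat → L[j]? = some (seroChar lst (y + (j : Int)) x) := by
    intro j hj
    rw [hL, PySem.List.pyRange_one, List.map_map, List.getElem?_map,
      List.getElem?_range (by omega)]
    simp
  have hlhs : (match some L with
      | some A => if A = A.reverse then some 1 else (none : Option Int)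
      | none => none).isSome = true ↔ (L = L.reverse) := by
    show (if L = L.reverse then (some 1 : Option Int) else none).isSome = true ↔ (L = L.reverse)
    rcases eq_or_ne L L.reverse with h | h
    · rw [if_pos h]; simpa using h
    · rw [if_neg h]; simpa using h
  rw [hlhs, sero_palindrome_half, PySem.Int.floordiv_eq_ediv_of_pos (by norm_num : (0:Int) < 2),
    List.all_eq_true]
  constructor
  · intro h j hj
    rw [PySem.List.mem_pyRange_one] at hj
    have hjn : j.toNat < L.length / 2 := by rw [hlen]; omega
    have := h j.toNat hjn
    rw [hget j.toNat (by omega), hget (L.length - 1 - j.toNat) (by omega)] at this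
    rw [show y + k - 1 - j = y + (k - 1 - j) by ring,
      hcell j hj.1 (by omega), hcell (k - 1 - j) (by omega) (by omega)]
    simp only [Option.some.injEq] at this
    have harg : y + ((L.length - 1 - j.toNat : Nat) : Int) = y + (k - 1 - j) := by
      rw [hlen]; omega
    rw [show ((j.toNat : Nat) : Int) = j by omega] at this
    rw [harg] at this
    simp [this]
  · intro h j hj
    by_cases hk1 : k.toNat < 2
    · omega
    · have hjk : (j : Int) < k / 2 := by rw [hlen] at hj; omega
      have := h (j : Int) (by rw [PySem.List.mem_pyRange_one]; constructor <;> omega)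
      rw [show y + k - 1 - (j : Int) = y + (k - 1 - (j : Int)) by ring,
        hcell (j : Int) (by omega) (by rw [hlen] at hj; omega),
        hcell (k - 1 - (j : Int)) (by omega) (by omega)] at this
      simp only [beq_iff_eq, Option.some.injEq] at this
      rw [hget j (by rw [hlen] at hj; omega), hget (L.length - 1 - j) (by rw [hlen] at hj; omega)]
      have harg : y + ((L.length - 1 - j : Nat) : Int) = y + (k - 1 - (j : Int)) := by
        rw [hlen]; rw [hlen] at hj; omega
      rw [harg]
      simp [this]

-- the early-exit counted loop, flattened to an existence test over the range it walks
theorem seroFor_any (body : Int → Option Int) (hp : ∀ a, (body a).isSome → body a = some 1) :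
    ∀ (n : Nat) (a b : Int), n = (b - a).toNat →
      seroFor body a n
        = if (PySem.List.pyRange a b 1).any (fun z => (body z).isSome) then some 1 else none := by
  intro n
  induction n with
  | zero =>
    intro a b hn
    rw [PySem.List.pyRange_one_eq_nil (by omega)]
    simp [seroFor]
  | succ n ih =>
    intro a b hn
    rw [PySem.List.pyRange_one_cons (by omega), List.any_cons]
    show (match body a with
      | some v => some v
      | none => seroFor body (a + 1) n) = _
    by_cases h : (body a).isSome
    · rw [hp a h]
      simp
    · rw [Option.not_isSome_iff_eq_none] at h
      rw [h, ih (a + 1) b (by omega)]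
      rfl

-- both ports, flattened to existence tests over the same index rectangle
set_option maxRecDepth 4096 in
theorem sero_eq_any (lst : List String) (k : Int) :
    sero lst k =
      if (PySem.List.pyRange 0 (101 - k) 1).any (fun y => (PySem.List.pyRange 0 100 1).any
          (fun x => (match seroBuild lst y x (PySem.List.pyRange 0 k 1) with
            | some A => if A = A.reverse then some 1 else (none : Option Int)
            | none => none).isSome))
      then some 1 else none := by
  have hp : ∀ y x : Int, ((match seroBuild lst y x (PySem.List.pyRange 0 k 1) with
      | some A => if A = A.reverse then some 1 else (none : Option Int)
      | none => none)).isSome →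
      (match seroBuild lst y x (PySem.List.pyRange 0 k 1) with
        | some A => if A = A.reverse then some 1 else (none : Option Int)
        | none => none) = some 1 := by
    intro y x h
    revert h
    cases seroBuild lst y x (PySem.List.pyRange 0 k 1) with
    | none => simp
    | some A =>
      show (if A = A.reverse then (some 1 : Option Int) else none).isSome = true →
        (if A = A.reverse then (some 1 : Option Int) else none) = some 1
      rcases eq_or_ne A A.reverse with h | h
      · rw [if_pos h]; intro _; rfl
      · rw [if_neg h]; simp
  have hiff : ∀ (c : Bool), ((if c = true then (some 1 : Option Int) else none)).isSome = c := by
    intro c; cases c <;> simp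
  have hinner : ∀ y : Int,
      (PySem.List.pyRange 0 100 1).foldl (fun r2 x =>
        if r2.isSome then r2 else
          match seroBuild lst y x (PySem.List.pyRange 0 k 1) with
          | some A => if A = A.reverse then some 1 else (none : Option Int)
          | none => none) none
        = if (PySem.List.pyRange 0 100 1).any
            (fun x => (match seroBuild lst y x (PySem.List.pyRange 0 k 1) with
              | some A => if A = A.reverse then some 1 else (none : Option Int)
              | none => none).isSome)
          then some 1 else none := by
    intro y
    exact sero_foldHit _ (hp y) (PySem.List.pyRange 0 100 1) none
  show seroFor _ 0 (101 - k).toNat = _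
  rw [seroFor_any _ (fun y hy => ?_) (101 - k).toNat 0 (101 - k) (by omega)]
  · simp only [hinner, hiff]
  · rw [hinner y] at hy ⊢
    by_cases h : (PySem.List.pyRange 0 100 1).any
        (fun x => (match seroBuild lst y x (PySem.List.pyRange 0 k 1) with
          | some A => if A = A.reverse then some 1 else (none : Option Int)
          | none => none).isSome)
    · rw [if_pos h]
    · rw [if_neg h] at hy
      simp at hy

theorem sero_alt_eq_any (lst : List String) (k : Int) :
    sero_alt lst k =
      if (PySem.List.pyRange 0 100 1).any (fun x => (PySem.List.pyRange 0 (101 - k) 1).any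
          (fun y => (PySem.List.pyRange 0 (PySem.Int.floordiv k 2) 1).all
            (fun j => seroCell lst (y + j) x == seroCell lst (y + k - 1 - j) x)))
      then some 1 else none := by
  have hp : ∀ x y : Int, ((if (PySem.List.pyRange 0 (PySem.Int.floordiv k 2) 1).all
        (fun j => seroCell lst (y + j) x == seroCell lst (y + k - 1 - j) x)
      then some 1 else (none : Option Int))).isSome →
      (if (PySem.List.pyRange 0 (PySem.Int.floordiv k 2) 1).all
        (fun j => seroCell lst (y + j) x == seroCell lst (y + k - 1 - j) x)
      then some 1 else (none : Option Int)) = some 1 := by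
    intro x y
    by_cases h : (PySem.List.pyRange 0 (PySem.Int.floordiv k 2) 1).all
        (fun j => seroCell lst (y + j) x == seroCell lst (y + k - 1 - j) x)
    · rw [if_pos h]; intro _; rfl
    · rw [if_neg h]; simp
  have hiff : ∀ (c : Bool), ((if c = true then (some 1 : Option Int) else none)).isSome = c := by
    intro c; cases c <;> simp
  have hinner : ∀ x : Int,
      seroFor (fun y =>
        if (PySem.List.pyRange 0 (PySem.Int.floordiv k 2) 1).all
             (fun j => seroCell lst (y + j) x == seroCell lst (y + k - 1 - j) x)
        then some 1 else (none : Option Int)) 0 (101 - k).toNat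
        = if (PySem.List.pyRange 0 (101 - k) 1).any
            (fun y => (PySem.List.pyRange 0 (PySem.Int.floordiv k 2) 1).all
              (fun j => seroCell lst (y + j) x == seroCell lst (y + k - 1 - j) x))
          then some 1 else none := by
    intro x
    rw [seroFor_any _ (hp x) (101 - k).toNat 0 (101 - k) (by omega)]
    simp only [hiff]
  have hp2 : ∀ x : Int,
      (seroFor (fun y =>
        if (PySem.List.pyRange 0 (PySem.Int.floordiv k 2) 1).all
             (fun j => seroCell lst (y + j) x == seroCell lst (y + k - 1 - j) x)
        then some 1 else (none : Option Int)) 0 (101 - k).toNat).isSome →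
      seroFor (fun y =>
        if (PySem.List.pyRange 0 (PySem.Int.floordiv k 2) 1).all
             (fun j => seroCell lst (y + j) x == seroCell lst (y + k - 1 - j) x)
        then some 1 else (none : Option Int)) 0 (101 - k).toNat = some 1 := by
    intro x hx
    rw [hinner x] at hx ⊢
    by_cases h : (PySem.List.pyRange 0 (101 - k) 1).any
        (fun y => (PySem.List.pyRange 0 (PySem.Int.floordiv k 2) 1).all
          (fun j => seroCell lst (y + j) x == seroCell lst (y + k - 1 - j) x))
    · rw [if_pos h]
    · rw [if_neg h] at hx
      simp at hx
  show (PySem.List.pyRange 0 100 1).foldl _ none = _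
  rw [sero_foldHit _ hp2 (PySem.List.pyRange 0 100 1) none]
  simp only [hinner, hiff]
  rfl

theorem sero_main (lst : List String) (k : Int) (hpre : Pre_sero lst k) :
    sero lst k = sero_alt lst k := by
  rw [sero_eq_any, sero_alt_eq_any]
  suffices h : (PySem.List.pyRange 0 (101 - k) 1).any (fun y => (PySem.List.pyRange 0 100 1).any
        (fun x => (match seroBuild lst y x (PySem.List.pyRange 0 k 1) with
          | some A => if A = A.reverse then some 1 else (none : Option Int)
          | none => none).isSome))
      = (PySem.List.pyRange 0 100 1).any (fun x => (PySem.List.pyRange 0 (101 - k) 1).any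
        (fun y => (PySem.List.pyRange 0 (PySem.Int.floordiv k 2) 1).all
          (fun j => seroCell lst (y + j) x == seroCell lst (y + k - 1 - j) x))) by rw [h]
  rw [Bool.eq_iff_iff]
  simp only [List.any_eq_true, PySem.List.mem_pyRange_one]
  by_cases hk0 : k ≤ 0
  · apply iff_of_true
    · refine ⟨0, ⟨by omega, by omega⟩, 0, ⟨by omega, by omega⟩, ?_⟩
      simp [seroBuild, PySem.List.pyRange_one_eq_nil hk0]
    · refine ⟨0, ⟨by omega, by omega⟩, 0, ⟨by omega, by omega⟩, ?_⟩
      rw [PySem.Int.floordiv_eq_ediv_of_pos (by norm_num : (0:Int) < 2)]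
      simp [PySem.List.pyRange_one_eq_nil (show k / 2 ≤ 0 by omega)]
  · by_cases hk100 : 100 < k
    · apply iff_of_false
      · rintro ⟨y, ⟨hy1, hy2⟩, -⟩; omega
      · rintro ⟨x, -, y, ⟨hy1, hy2⟩, -⟩; omega
    · have hg : 100 ≤ lst.length ∧ ∀ s ∈ lst.take 100, 100 ≤ PySem.Str.len s := by
        rcases hpre with h | h | h
        · omega
        · omega
        · exact h
      constructor
      · rintro ⟨y, ⟨hy1, hy2⟩, x, ⟨hx1, hx2⟩, hhit⟩
        refine ⟨x, ⟨hx1, hx2⟩, y, ⟨hy1, hy2⟩, ?_⟩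
        exact (sero_hit_iff lst k y x (by omega) (by omega) hg hy1 hy2 hx1 hx2).mp hhit
      · rintro ⟨x, ⟨hx1, hx2⟩, y, ⟨hy1, hy2⟩, hhit⟩
        refine ⟨y, ⟨hy1, hy2⟩, x, ⟨hx1, hx2⟩, ?_⟩
        exact (sero_hit_iff lst k y x (by omega) (by omega) hg hy1 hy2 hx1 hx2).mpr hhit

-- ===== VERDICT (by name: the statement is the Claim_ definition above) =====
theorem sero_spec : Claim_equal_sero := by
  intro lst k _ hpre
  unfold Spec_sero
  exact sero_main lst k hpre
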